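-- pv_equiv track=rewrite | github.com/ElleNajt/thought_anchors_and_unfaithful_CoT | compare_transplant_methods.py | build_cumulative_transplant
-- ===== SOURCE A (Python) =====
-- def split_into_sentences(text):
--     """Split text into sentences (simple version)."""
--     sentences = []
--     current = ""
--
--     for char in text:
--         current += char
--         if char in '.!?':
--             sentences.append(current.strip())
--             current = ""
--
--     if current.strip():
--         sentences.append(current.strip())
--
--     return sentences
--
-- def build_cumulative_transplant(problem, num_sentences):
--     """
--     Build a transplanted prompt with cumulative hint sentences:
--     [no-hint question] + [hint sentences 0 to num_sentences-1] + [answer prompt]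
--
--     Returns:
--         str: transplanted prompt
--     """
--     hint_reasoning = problem['reasoning_text']
--     hint_sentences = split_into_sentences(hint_reasoning)
--
--     question = problem['question']
--     transplanted_text = question  # Already has <think>\n at the end
--
--     # Add cumulative hint sentences
--     for idx in range(num_sentences):
--         if idx < len(hint_sentences):
--             transplanted_text += hint_sentences[idx] + " "
--
--     # Add the closing tag and answer prompt so we measure at the decision point
--     transplanted_text += "</think>\nTherefore, the best answer is: ("
--
--     return transplanted_text
-- ===== SOURCE B (Python) =====
-- def split_into_sentences(text):
--     """Split text into sentences by recursing on the remainder after each terminator."""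
--     for i, c in enumerate(text):
--         if c in '.!?':
--             return [text[:i + 1].strip()] + split_into_sentences(text[i + 1:])
--     tail = text.strip()
--     return [tail] if tail else []
--
--
-- def build_cumulative_transplant(problem, num_sentences):
--     hint_sentences = split_into_sentences(problem['reasoning_text'])
--     kept = hint_sentences[:max(0, num_sentences)]
--     return (problem['question']
--             + "".join(s + " " for s in kept)
--             + "</think>\nTherefore, the best answer is: (")
-- ===== Notes on version B (the rewrite author's own statement) =====
-- stated objective: alternative
-- what changed: split_into_sentences is rewritten as structural recursion that finds the next terminator index and slices (instead of a char-by-char accumulator loop), and the outer function replaces the guarded range loop with a slice hint_sentences[:max(0,num_sentences)] joined in one pass.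
-- outside the precondition, e.g. on build_cumulative_transplant({'question': 'Q'}, 1): A raises KeyError, B raises KeyError
import Mathlib
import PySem

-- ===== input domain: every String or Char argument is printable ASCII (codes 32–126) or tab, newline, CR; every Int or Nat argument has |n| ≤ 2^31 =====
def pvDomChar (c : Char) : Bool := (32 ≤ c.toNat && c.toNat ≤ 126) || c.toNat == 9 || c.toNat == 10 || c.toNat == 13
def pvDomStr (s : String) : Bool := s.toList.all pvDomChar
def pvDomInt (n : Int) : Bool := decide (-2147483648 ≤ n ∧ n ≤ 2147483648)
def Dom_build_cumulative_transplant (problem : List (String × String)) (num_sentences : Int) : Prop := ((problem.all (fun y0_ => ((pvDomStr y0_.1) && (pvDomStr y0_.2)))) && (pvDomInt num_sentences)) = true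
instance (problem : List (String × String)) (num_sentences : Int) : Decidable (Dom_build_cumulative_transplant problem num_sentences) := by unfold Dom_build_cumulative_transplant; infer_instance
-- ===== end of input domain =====

-- B replaces A's char-accumulator sentence splitter by terminator-index recursion with slicing,
-- and A's guarded range loop by a clamped slice joined in one pass (objective: alternative).

-- ===== PORT A =====
-- split_into_sentences: char loop accumulating `current`, flushing at '.', '!' or '?'
def split_into_sentences (text : String) : List String :=
  let st := text.toList.foldl
    (fun (st : List String × String) char =>
      let current := st.2 ++ char.toString
      if (".!?".toList.contains char) then (st.1 ++ [PySem.Str.strip current], "")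
      else (st.1, current))
    (([] : List String), "")
  if PySem.Str.strip st.2 ≠ "" then st.1 ++ [PySem.Str.strip st.2] else st.1

def build_cumulative_transplant (problem : List (String × String)) (num_sentences : Int) : String :=
  let hint_reasoning := ((PySem.Dict.ofList problem).get? "reasoning_text").getD ""
  let hint_sentences := split_into_sentences hint_reasoning
  let question := ((PySem.Dict.ofList problem).get? "question").getD ""
  let transplanted_text := question
  let transplanted_text := (PySem.List.pyRange 0 num_sentences 1).foldl
    (fun acc idx =>
      if idx < (hint_sentences.length : Int)
      then acc ++ PySem.List.pyGetD hint_sentences idx "" ++ " "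
      else acc) transplanted_text
  transplanted_text ++ "</think>\nTherefore, the best answer is: ("

-- ===== PORT B =====
-- Source B's recursive splitter: first terminator index (the enumerate scan), slice, strip, recurse on the rest
def split_into_sentences_alt_aux (cs : List Char) : List String :=
  match h : cs.findIdx? (fun c => ".!?".toList.contains c) with
  | some i =>
      String.ofList (PySem.Chars.strip (cs.take (i + 1)))
        :: split_into_sentences_alt_aux (cs.drop (i + 1))
  | none =>
      let tail := PySem.Chars.strip cs
      if tail.isEmpty then [] else [String.ofList tail]
termination_by cs.length
decreasing_by
  have hlt : i < cs.length := by
    have := List.findIdx?_eq_some_iff_findIdx_eq.mp h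
    exact this.1
  simp [List.length_drop]; omega

def split_into_sentences_alt (text : String) : List String :=
  split_into_sentences_alt_aux text.toList

def build_cumulative_transplant_alt (problem : List (String × String)) (num_sentences : Int) : String :=
  let hint_sentences := split_into_sentences_alt (((PySem.Dict.ofList problem).get? "reasoning_text").getD "")
  let kept := PySem.List.slice hint_sentences none (some (max 0 num_sentences))
  ((PySem.Dict.ofList problem).get? "question").getD ""
    ++ PySem.Str.join "" (kept.map (fun s => s ++ " "))
    ++ "</think>\nTherefore, the best answer is: ("

-- ===== PRECONDITION & SPEC =====
-- Pre_ excludes only dicts missing the 'reasoning_text' or 'question' key, on which A raises KeyError.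
def Pre_build_cumulative_transplant (problem : List (String × String)) (num_sentences : Int) : Prop :=
  ((PySem.Dict.ofList problem).contains "reasoning_text"
    && (PySem.Dict.ofList problem).contains "question") = true

instance (problem : List (String × String)) (num_sentences : Int) : Decidable (Pre_build_cumulative_transplant problem num_sentences) := by
  unfold Pre_build_cumulative_transplant; infer_instance

def pvWitness_build_cumulative_transplant : (List (String × String)) × Int :=
  ([("reasoning_text", "One. Two! Three"), ("question", "Q?\n")], 2)

def Spec_build_cumulative_transplant (problem : List (String × String)) (num_sentences : Int) (out : String) : Prop := out = build_cumulative_transplant_alt problem num_sentences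
instance (problem : List (String × String)) (num_sentences : Int) (out : String) : Decidable (Spec_build_cumulative_transplant problem num_sentences out) := by unfold Spec_build_cumulative_transplant; infer_instance

-- ===== CLAIM (what is proved, stated in full; the proofs are below) =====
def Claim_equal_build_cumulative_transplant : Prop := ∀ (problem : List (String × String)) (num_sentences : Int), Dom_build_cumulative_transplant problem num_sentences → Pre_build_cumulative_transplant problem num_sentences → Spec_build_cumulative_transplant problem num_sentences (build_cumulative_transplant problem num_sentences)

-- ===== LEMMAS AND PROOFS =====

lemma pv_aux_some (cs : List Char) (i : Nat)
    (h : cs.findIdx? (fun c => ".!?".toList.contains c) = some i) :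
    split_into_sentences_alt_aux cs
      = String.ofList (PySem.Chars.strip (cs.take (i + 1)))
          :: split_into_sentences_alt_aux (cs.drop (i + 1)) := by
  conv_lhs => rw [split_into_sentences_alt_aux]
  split
  · rename_i j hj
    have : some j = some i := hj.symm.trans h
    injection this with hji
    subst hji; rfl
  · rename_i hj
    rw [h] at hj; exact absurd hj (by simp)

lemma pv_findIdx?_append_first {p : Char → Bool} (cur : List Char) (c : Char) (cs : List Char)
    (hcur : ∀ x ∈ cur, p x = false) (hc : p c = true) :
    (cur ++ c :: cs).findIdx? p = some cur.length := by
  induction cur with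
  | nil => simp [List.findIdx?_cons, hc]
  | cons x xs ih =>
      have hx : p x = false := hcur x (by simp)
      have := ih (fun y hy => hcur y (by simp [hy]))
      simp [List.findIdx?_cons, hx, this]

lemma pv_split_fold_eq (cs : List Char) (acc : List String) (cur : List Char)
    (hcur : ∀ x ∈ cur, (".!?".toList.contains x) = false) :
    (let st := cs.foldl
        (fun (st : List String × String) char =>
          let current := st.2 ++ char.toString
          if (".!?".toList.contains char) then (st.1 ++ [PySem.Str.strip current], "")
          else (st.1, current))
        (acc, String.ofList cur)
     if PySem.Str.strip st.2 ≠ "" then st.1 ++ [PySem.Str.strip st.2] else st.1)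
    = acc ++ split_into_sentences_alt_aux (cur ++ cs) := by
  induction cs generalizing acc cur with
  | nil =>
      rw [split_into_sentences_alt_aux]
      rw [List.findIdx?_eq_none_iff.mpr (by simpa using hcur)]
      simp only [List.foldl_nil, List.append_nil]
      by_cases h : PySem.Chars.strip cur = []
      · simp [PySem.Str.strip, h]
      · simp [PySem.Str.strip, h]
  | cons c cs ih =>
      by_cases hc : (".!?".toList.contains c) = true
      · have hsplit : (cur ++ c :: cs).findIdx? (fun x => ".!?".toList.contains x) = some cur.length :=
          pv_findIdx?_append_first cur c cs hcur hc
        rw [pv_aux_some _ _ hsplit]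
        have htake : (cur ++ c :: cs).take (cur.length + 1) = cur ++ [c] := by
          simp [List.take_append]
        have hdrop : (cur ++ c :: cs).drop (cur.length + 1) = cs := by
          simp [List.drop_append]
        rw [htake, hdrop]
        clear hsplit
        have hstep : String.ofList cur ++ c.toString = String.ofList (cur ++ [c]) := by
          apply String.toList_inj.mp; simp
        simp only [List.foldl_cons, hc, hstep, if_true]
        have := ih (acc ++ [PySem.Str.strip (String.ofList (cur ++ [c]))]) [] (by simp)
        simp only [String.ofList_nil] at this ⊢
        rw [this]
        have : PySem.Str.strip (String.ofList (cur ++ [c]))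
            = String.ofList (PySem.Chars.strip (cur ++ [c])) := by
          simp [PySem.Str.strip]
        rw [this]
        simp
      · have hc' : (".!?".toList.contains c) = false := by simpa using hc
        have hstep : String.ofList cur ++ c.toString = String.ofList (cur ++ [c]) := by
          apply String.toList_inj.mp; simp
        simp only [List.foldl_cons, hc', hstep, Bool.false_eq_true, if_false]
        have := ih acc (cur ++ [c]) (by
          intro x hx
          rcases List.mem_append.mp hx with h1 | h1
          · exact hcur x h1
          · simp at h1; subst h1; exact hc')
        rw [this, List.append_assoc]
        rfl

lemma pv_split_eq (text : String) :
    split_into_sentences text = split_into_sentences_alt text := by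
  unfold split_into_sentences split_into_sentences_alt
  have := pv_split_fold_eq text.toList [] [] (by simp)
  simpa using this

lemma pv_join_empty_append (l : List String) (s : String) :
    PySem.Str.join "" (l ++ [s]) = PySem.Str.join "" l ++ s := by
  apply String.toList_inj.mp
  simp [PySem.Str.join, PySem.Chars.join, List.intercalate]
  induction l with
  | nil => simp [List.intersperse]
  | cons x xs ih => cases xs <;> simp_all

lemma pv_range_fold_eq (hints : List String) (q : String) (n : Nat) :
    (List.range n).foldl
      (fun acc (k : Nat) =>
        if ((k : Int)) < (hints.length : Int)
        then acc ++ PySem.List.pyGetD hints ((k : Int)) "" ++ " "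
        else acc) q
    = q ++ PySem.Str.join "" ((hints.take n).map (fun s => s ++ " ")) := by
  induction n with
  | zero => simp [PySem.Str.join, PySem.Chars.join, List.intercalate]
  | succ n ih =>
      rw [List.range_succ, List.foldl_append, ih]
      by_cases h : n < hints.length
      · have hn : ((n : Int) < (hints.length : Int)) := by exact_mod_cast h
        simp only [List.foldl_cons, List.foldl_nil, if_pos hn]
        rw [PySem.List.pyGetD_natCast]
        rw [List.take_add_one]
        have hg : hints[n]? = some hints[n] := List.getElem?_eq_getElem h
        rw [hg]
        simp only [Option.toList_some, List.map_append, List.map_cons, List.map_nil]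
        rw [pv_join_empty_append]
        simp [List.getD, hg, String.append_assoc]
      · have hn : ¬ ((n : Int) < (hints.length : Int)) := by exact_mod_cast h
        simp only [List.foldl_cons, List.foldl_nil, if_neg hn]
        rw [List.take_of_length_le (by omega), List.take_of_length_le (by omega)]

lemma pv_loop_eq (hints : List String) (num : Int) (q : String) :
    (PySem.List.pyRange 0 num 1).foldl
      (fun acc idx =>
        if idx < (hints.length : Int)
        then acc ++ PySem.List.pyGetD hints idx "" ++ " "
        else acc) q
    = q ++ PySem.Str.join "" ((PySem.List.slice hints none (some (max 0 num))).map (fun s => s ++ " ")) := by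
  by_cases hnum : num ≤ 0
  · rw [PySem.List.pyRange_one_eq_nil hnum]
    have hmax : max 0 num = 0 := by omega
    rw [hmax, PySem.List.slice_to hints (by omega)]
    simp [PySem.Str.join, PySem.Chars.join, List.intercalate]
  · have h0 : (0 : Int) ≤ num := by omega
    have hmax : max 0 num = num := by omega
    rw [hmax, PySem.List.slice_to hints h0]
    rw [PySem.List.pyRange_one]
    rw [List.foldl_map]
    have hnn : num - 0 = num := by ring
    rw [hnn]
    have key := pv_range_fold_eq hints q num.toNat
    simp only [zero_add]
    exact key

-- ===== VERDICT (by name: the statement is the Claim_ definition above) =====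
theorem build_cumulative_transplant_spec : Claim_equal_build_cumulative_transplant := by
  intro problem num_sentences _hdom _hpre
  unfold Spec_build_cumulative_transplant
  simp only [build_cumulative_transplant, build_cumulative_transplant_alt]
  rw [pv_split_eq, pv_loop_eq]
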